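-- pv_equiv track=rewrite | github.com/llimllib/banger_crawler | aggregate_songs.py | get_best_youtube_url
-- ===== SOURCE A (Python) =====
-- def get_best_youtube_url(urls):
--     """Pick the best YouTube URL from a list."""
--     for url in urls:
--         if 'youtube.com/watch' in url or 'youtu.be/' in url:
--             # Prefer youtube.com over youtu.be
--             if 'youtube.com' in url:
--                 return url
--     # Fall back to first youtube URL
--     for url in urls:
--         if 'youtu' in url:
--             return url
--     return urls[0] if urls else None
-- ===== SOURCE B (Python) =====
-- def get_best_youtube_url(urls):
--     """Pick the best YouTube URL from a list."""
--     fallback = None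
--     for url in urls:
--         if 'youtube.com' in url and ('youtube.com/watch' in url or 'youtu.be/' in url):
--             return url
--         if fallback is None and 'youtu' in url:
--             fallback = url
--     if fallback is not None:
--         return fallback
--     return urls[0] if urls else None
-- ===== Notes on version B (the rewrite author's own statement) =====
-- stated objective: alternative
-- what changed: Collapses A's two sequential scans into a single pass that returns the first best match immediately and tracks the first 'youtu'-containing url as a fallback.
import Mathlib
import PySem

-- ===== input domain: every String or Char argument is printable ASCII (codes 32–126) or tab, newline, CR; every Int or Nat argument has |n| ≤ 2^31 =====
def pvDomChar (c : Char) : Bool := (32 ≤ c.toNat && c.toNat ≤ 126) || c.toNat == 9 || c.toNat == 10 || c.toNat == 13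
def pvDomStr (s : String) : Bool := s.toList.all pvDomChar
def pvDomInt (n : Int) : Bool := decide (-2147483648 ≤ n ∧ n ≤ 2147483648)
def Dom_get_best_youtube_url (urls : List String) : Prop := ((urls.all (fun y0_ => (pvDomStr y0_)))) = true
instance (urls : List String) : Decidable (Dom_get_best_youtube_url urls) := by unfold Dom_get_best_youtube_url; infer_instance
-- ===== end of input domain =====

-- B merges A's two scans into a single pass keeping a first-'youtu' fallback; same return value, one traversal.

-- ===== PORT A =====
-- first loop of A: first url with ('youtube.com/watch' in url or 'youtu.be/' in url) and 'youtube.com' in url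
def pvScan1 (urls : List String) : Option String :=
  match urls with
  | [] => none
  | url :: rest =>
    if PySem.Str.isIn "youtube.com/watch" url || PySem.Str.isIn "youtu.be/" url then
      if PySem.Str.isIn "youtube.com" url then some url else pvScan1 rest
    else pvScan1 rest

-- second loop of A: first url with 'youtu' in url
def pvScan2 (urls : List String) : Option String :=
  match urls with
  | [] => none
  | url :: rest => if PySem.Str.isIn "youtu" url then some url else pvScan2 rest

def get_best_youtube_url (urls : List String) : Option String :=
  match pvScan1 urls with
  | some url => some url
  | none =>
    match pvScan2 urls with
    | some url => some url
    | none => match urls with | [] => none | u :: _ => some u   -- urls[0] if urls else None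

-- ===== PORT B =====
-- single loop of B: early return on a best match, otherwise carry the fallback; at loop end return fallback
def pvLoopB (rest : List String) (fallback : Option String) : Option String :=
  match rest with
  | [] => fallback
  | url :: rs =>
    if PySem.Str.isIn "youtube.com" url &&
        (PySem.Str.isIn "youtube.com/watch" url || PySem.Str.isIn "youtu.be/" url) then
      some url
    else
      pvLoopB rs (if fallback.isNone && PySem.Str.isIn "youtu" url then some url else fallback)

def get_best_youtube_url_alt (urls : List String) : Option String :=
  match pvLoopB urls none with
  | some url => some url
  | none => match urls with | [] => none | u :: _ => some u   -- urls[0] if urls else None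

-- ===== PRECONDITION & SPEC =====
def Spec_get_best_youtube_url (urls : List String) (out : Option String) : Prop := out = get_best_youtube_url_alt urls
instance (urls : List String) (out : Option String) : Decidable (Spec_get_best_youtube_url urls out) := by unfold Spec_get_best_youtube_url; infer_instance

-- ===== CLAIM (what is proved, stated in full; the proofs are below) =====
def Claim_equal_get_best_youtube_url : Prop := ∀ (urls : List String), Dom_get_best_youtube_url urls → Spec_get_best_youtube_url urls (get_best_youtube_url urls)

-- ===== LEMMAS AND PROOFS =====

-- loop invariant: B's one-pass loop equals A's first scan, then the carried fallback, then A's second scan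
theorem pvLoopB_eq (rest : List String) (fb : Option String) :
    pvLoopB rest fb =
      match pvScan1 rest with
      | some u => some u
      | none => match fb with
        | some f => some f
        | none => pvScan2 rest := by
  induction rest generalizing fb with
  | nil => cases fb <;> simp [pvLoopB, pvScan1, pvScan2]
  | cons url rs ih =>
    simp only [pvLoopB, pvScan1, pvScan2]
    generalize PySem.Str.isIn "youtube.com" url = c
    generalize PySem.Str.isIn "youtube.com/watch" url = w
    generalize PySem.Str.isIn "youtu.be/" url = b
    generalize PySem.Str.isIn "youtu" url = y
    cases c <;> cases w <;> cases b <;> cases y <;> cases fb <;>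
      simp [ih] <;> cases pvScan1 rs <;> simp

-- ===== VERDICT (by name: the statement is the Claim_ definition above) =====
theorem get_best_youtube_url_spec : Claim_equal_get_best_youtube_url := by
  intro urls _
  unfold Spec_get_best_youtube_url get_best_youtube_url get_best_youtube_url_alt
  rw [pvLoopB_eq]
  cases pvScan1 urls <;> cases h2 : pvScan2 urls <;> simp
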